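-- pv_equiv track=rewrite | github.com/Tanjastacy/petflix_3.0 | Petflix_2.1.py | _add_umlaut_variants
-- ===== SOURCE A (Python) =====
-- def _add_umlaut_variants(words: list[str]) -> list[str]:
--     out = []
--     for word in words:
--         w = (word or "").strip()
--         if not w:
--             continue
--         out.append(w)
--         variant = (
--             w.replace("ae", "ä")
--              .replace("oe", "ö")
--              .replace("ue", "ü")
--              .replace("Ae", "Ä")
--              .replace("Oe", "Ö")
--              .replace("Ue", "Ü")
--         )
--         if variant != w:
--             out.append(variant)
--     return out
-- ===== SOURCE B (Python) =====
-- _UMLAUTS = {'a': 'ä', 'o': 'ö', 'u': 'ü', 'A': 'Ä', 'O': 'Ö', 'U': 'Ü'}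
--
-- def _add_umlaut_variants(words: list[str]) -> list[str]:
--     out = []
--     for word in words:
--         w = (word or "").strip()
--         if not w:
--             continue
--         out.append(w)
--         chars = []
--         changed = False
--         i = 0
--         n = len(w)
--         while i < n:
--             c = w[i]
--             acc = _UMLAUTS.get(c)
--             if acc is not None and i + 1 < n and w[i + 1] == 'e':
--                 chars.append(acc)
--                 changed = True
--                 i += 2
--             else:
--                 chars.append(c)
--                 i += 1
--         if changed:
--             out.append(''.join(chars))
--     return out
-- ===== Notes on version B (the rewrite author's own statement) =====
-- stated objective: alternative
-- what changed: The six chained str.replace passes over each word are replaced by a single left-to-right character scan driven by a key->umlaut dict, emitting the accent when a key is followed by 'e' and tracking a 'changed' flag instead of re-comparing the whole string.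
import Mathlib
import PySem

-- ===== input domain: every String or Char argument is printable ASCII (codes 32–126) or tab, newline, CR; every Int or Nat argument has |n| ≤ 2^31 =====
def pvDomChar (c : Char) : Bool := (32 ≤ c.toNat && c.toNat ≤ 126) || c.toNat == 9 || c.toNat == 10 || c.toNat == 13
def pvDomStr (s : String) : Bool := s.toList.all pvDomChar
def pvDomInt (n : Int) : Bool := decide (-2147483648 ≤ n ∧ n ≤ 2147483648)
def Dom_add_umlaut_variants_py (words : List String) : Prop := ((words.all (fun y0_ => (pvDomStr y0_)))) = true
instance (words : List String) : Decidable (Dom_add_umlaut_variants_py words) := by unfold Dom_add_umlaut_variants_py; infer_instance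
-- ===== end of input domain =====

-- B replaces A's six chained str.replace passes per word by one dict-driven left-to-right
-- character scan with a 'changed' flag (objective: alternative decomposition, same cost class).

-- ===== PORT A =====
def add_umlaut_variants_py (words : List String) : List String :=
  words.foldl (fun out word =>
    let w := PySem.Str.strip (if word == "" then "" else word)
    if w == "" then out
    else
      let out := out ++ [w]
      let variant :=
        PySem.Str.replace (PySem.Str.replace (PySem.Str.replace
          (PySem.Str.replace (PySem.Str.replace (PySem.Str.replace w "ae" "ä")
            "oe" "ö") "ue" "ü") "Ae" "Ä") "Oe" "Ö") "Ue" "Ü"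
      if variant != w then out ++ [variant] else out) []

-- ===== PORT B =====
def pvUmlautMap : PySem.Dict Char Char :=
  PySem.Dict.ofList [('a', 'ä'), ('o', 'ö'), ('u', 'ü'), ('A', 'Ä'), ('O', 'Ö'), ('U', 'Ü')]

-- the while-loop of Source B: walks the characters, returns (chars, changed)
def pvScan : List Char → List Char × Bool
  | [] => ([], false)
  | c :: rest =>
    match PySem.Dict.get? pvUmlautMap c with
    | some acc =>
      match rest with
      | e :: rest2 =>
        if e == 'e' then (acc :: (pvScan rest2).1, true)
        else (c :: (pvScan (e :: rest2)).1, (pvScan (e :: rest2)).2)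
      | [] => (c :: (pvScan []).1, (pvScan []).2)
    | none => (c :: (pvScan rest).1, (pvScan rest).2)

def add_umlaut_variants_py_alt (words : List String) : List String :=
  words.foldl (fun out word =>
    let w := PySem.Str.strip (if word == "" then "" else word)
    if w == "" then out
    else
      let out := out ++ [w]
      let r := pvScan w.toList
      if r.2 then out ++ [String.ofList r.1] else out) []

-- ===== PRECONDITION & SPEC =====
def Spec_add_umlaut_variants_py (words : List String) (out : List String) : Prop := out = add_umlaut_variants_py_alt words
instance (words : List String) (out : List String) : Decidable (Spec_add_umlaut_variants_py words out) := by unfold Spec_add_umlaut_variants_py; infer_instance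

-- ===== CLAIM (what is proved, stated in full; the proofs are below) =====
def Claim_equal_add_umlaut_variants_py : Prop := ∀ (words : List String), Dom_add_umlaut_variants_py words → Spec_add_umlaut_variants_py words (add_umlaut_variants_py words)

-- ===== LEMMAS AND PROOFS =====

-- one two-char replace pass, written structurally
def pvRep2 (k e v : Char) : List Char → List Char
  | a :: b :: t => if a = k ∧ b = e then v :: pvRep2 k e v t else a :: pvRep2 k e v (b :: t)
  | l => l

theorem pvRep2_cons_cons (k e v a b : Char) (t : List Char) :
    pvRep2 k e v (a :: b :: t) =
      if a = k ∧ b = e then v :: pvRep2 k e v t else a :: pvRep2 k e v (b :: t) := by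
  rfl

theorem pvRep2_skip (k e v c : Char) (l : List Char) (h : c ≠ k) :
    pvRep2 k e v (c :: l) = c :: pvRep2 k e v l := by
  cases l with
  | nil => rfl
  | cons b t => rw [pvRep2_cons_cons]; simp [h]

theorem pvRep2_skip_head (k e v : Char) (l : List Char) (h : l.head? ≠ some e) :
    pvRep2 k e v (k :: l) = k :: pvRep2 k e v l := by
  cases l with
  | nil => rfl
  | cons b t =>
    rw [pvRep2_cons_cons]
    simp only [List.head?_cons] at h
    have hb : ¬ b = e := fun hb => h (by rw [hb])
    simp [hb]

theorem pvRep2_head (k e v : Char) (hv : v ≠ e) (l : List Char) (h : l.head? ≠ some e) :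
    (pvRep2 k e v l).head? ≠ some e := by
  match l with
  | [] => simpa [pvRep2] using h
  | [a] => simpa [pvRep2] using h
  | a :: b :: t =>
    rw [pvRep2_cons_cons]
    split_ifs with hc
    · simpa using hv
    · simpa using (by simpa using h)

theorem pvReplace_go_eq (k e v : Char) (fuel : Nat) (l acc : List Char)
    (h : l.length ≤ fuel) :
    PySem.Chars.replace.go [k, e] [v] fuel l acc = acc.reverse ++ pvRep2 k e v l := by
  induction fuel generalizing l acc with
  | zero =>
    have : l = [] := List.eq_nil_of_length_eq_zero (Nat.le_zero.mp h)
    subst this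
    simp [PySem.Chars.replace.go, pvRep2]
  | succ n ih =>
    cases l with
    | nil => simp [PySem.Chars.replace.go, pvRep2]
    | cons c t =>
      rw [PySem.Chars.replace.go]
      by_cases hp : [k, e].isPrefixOf (c :: t) = true
      · cases t with
        | nil => simp [List.isPrefixOf] at hp
        | cons b t' =>
          have hkb : k = c ∧ e = b := by simpa [List.isPrefixOf] using hp
          obtain ⟨rfl, rfl⟩ := hkb
          simp only [hp, if_true, List.length_cons, List.length_nil, List.drop_succ_cons,
            List.drop_zero]
          have ht' : t'.length ≤ n := by simp at h; omega
          rw [ih _ _ ht']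
          rw [pvRep2_cons_cons]
          simp
      · simp only [hp, if_false]
        have ht : t.length ≤ n := by simp at h; omega
        rw [ih _ _ ht]
        have : pvRep2 k e v (c :: t) = c :: pvRep2 k e v t := by
          cases t with
          | nil => rfl
          | cons b t' =>
            rw [pvRep2_cons_cons]
            have : ¬ (c = k ∧ b = e) := by
              intro ⟨h1, h2⟩
              exact hp (by simp [List.isPrefixOf, h1, h2])
            simp [this]
        rw [this]
        simp
termination_by fuel

theorem pvReplace_eq_rep2 (k e v : Char) (l : List Char) :
    PySem.Chars.replace l [k, e] [v] = pvRep2 k e v l := by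
  rw [PySem.Chars.replace]
  simp only [List.isEmpty_cons, Bool.false_eq_true, if_false]
  simpa using pvReplace_go_eq k e v l.length l [] (le_refl _)

-- the full six-pass chain of A, on character lists
def pvChain (l : List Char) : List Char :=
  pvRep2 'U' 'e' 'Ü' (pvRep2 'O' 'e' 'Ö' (pvRep2 'A' 'e' 'Ä'
    (pvRep2 'u' 'e' 'ü' (pvRep2 'o' 'e' 'ö' (pvRep2 'a' 'e' 'ä' l)))))


-- unfolding and evaluation lemmas for pvScan and the literal dict
theorem pvScan_cons_cons (a b : Char) (t : List Char) :
    pvScan (a :: b :: t) = match PySem.Dict.get? pvUmlautMap a with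
      | some acc =>
        if b == 'e' then (acc :: (pvScan t).1, true)
        else (a :: (pvScan (b :: t)).1, (pvScan (b :: t)).2)
      | none => (a :: (pvScan (b :: t)).1, (pvScan (b :: t)).2) := by
  rw [pvScan]

theorem pvScan_single (a : Char) : pvScan [a] = ([a], false) := by
  unfold pvScan
  cases PySem.Dict.get? pvUmlautMap a <;> rfl

theorem pvGet_none (a : Char) (h1 : a ≠ 'a') (h2 : a ≠ 'o') (h3 : a ≠ 'u')
    (h4 : a ≠ 'A') (h5 : a ≠ 'O') (h6 : a ≠ 'U') :
    PySem.Dict.get? pvUmlautMap a = none := by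
  have e : pvUmlautMap = PySem.Dict.mk [('a', 'ä'), ('o', 'ö'), ('u', 'ü'), ('A', 'Ä'), ('O', 'Ö'), ('U', 'Ü')] := by
    decide
  rw [e]
  simp [PySem.Dict.get?, List.find?,
    beq_eq_false_iff_ne.mpr (Ne.symm h1), beq_eq_false_iff_ne.mpr (Ne.symm h2),
    beq_eq_false_iff_ne.mpr (Ne.symm h3), beq_eq_false_iff_ne.mpr (Ne.symm h4),
    beq_eq_false_iff_ne.mpr (Ne.symm h5), beq_eq_false_iff_ne.mpr (Ne.symm h6)]

theorem pvScan_len_le (l : List Char) : (pvScan l).1.length ≤ l.length := by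
  induction l using pvScan.induct with
  | case1 => simp [pvScan]
  | case2 c acc h e rest2 he ih =>
    rw [pvScan_cons_cons, h]
    simp only [he, if_true]
    simp
    omega
  | case3 c acc h e rest2 he ih =>
    rw [pvScan_cons_cons, h]
    simp only [he, if_false]
    simp at ih ⊢
    omega
  | case4 c acc h ih => simp [pvScan_single]
  | case5 c rest h ih =>
    cases rest with
    | nil => simp [pvScan_single]
    | cons b t =>
      rw [pvScan_cons_cons, h]
      simp at ih ⊢
      omega

theorem pvScan_fst_len (l : List Char) : (pvScan l).2 = true → (pvScan l).1.length < l.length := by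
  induction l using pvScan.induct with
  | case1 => simp [pvScan]
  | case2 c acc h e rest2 he ih =>
    intro _
    rw [pvScan_cons_cons, h]
    simp only [he, if_true]
    have := pvScan_len_le rest2
    simp
    omega
  | case3 c acc h e rest2 he ih =>
    rw [pvScan_cons_cons, h]
    simp only [he, if_false]
    intro h2
    have := ih (by simpa using h2)
    simp at this ⊢
    omega
  | case4 c acc h ih => simp [pvScan_single]
  | case5 c rest h ih =>
    cases rest with
    | nil => simp [pvScan_single]
    | cons b t =>
      rw [pvScan_cons_cons, h]
      intro h2
      have := ih (by simpa using h2)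
      simp at this ⊢
      omega

theorem pvScan_fst_id (l : List Char) : (pvScan l).2 = false → (pvScan l).1 = l := by
  induction l using pvScan.induct with
  | case1 => simp [pvScan]
  | case2 c acc h e rest2 he ih =>
    rw [pvScan_cons_cons, h]
    simp [he]
  | case3 c acc h e rest2 he ih =>
    rw [pvScan_cons_cons, h]
    simp only [he, if_false]
    intro h2
    simpa using ih (by simpa using h2)
  | case4 c acc h ih => simp [pvScan_single]
  | case5 c rest h ih =>
    cases rest with
    | nil => simp [pvScan_single]
    | cons b t =>
      rw [pvScan_cons_cons, h]
      intro h2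
      simpa using ih (by simpa using h2)

theorem pvChain_eq_scan : ∀ (l : List Char), pvChain l = (pvScan l).1
  | [] => by simp [pvChain, pvRep2, pvScan]
  | [a] => by
    rw [pvScan_single]
    simp [pvChain, pvRep2]
  | a :: b :: t => by
    have iht := pvChain_eq_scan t
    have ihbt := pvChain_eq_scan (b :: t)
    have gA : PySem.Dict.get? pvUmlautMap 'a' = some 'ä' := by decide
    have gO : PySem.Dict.get? pvUmlautMap 'o' = some 'ö' := by decide
    have gU : PySem.Dict.get? pvUmlautMap 'u' = some 'ü' := by decide
    have gcA : PySem.Dict.get? pvUmlautMap 'A' = some 'Ä' := by decide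
    have gcO : PySem.Dict.get? pvUmlautMap 'O' = some 'Ö' := by decide
    have gcU : PySem.Dict.get? pvUmlautMap 'U' = some 'Ü' := by decide
    rw [pvScan_cons_cons]
    by_cases ha1 : a = 'a'
    · subst ha1
      rw [gA]
      by_cases hb : b = 'e'
      · subst hb
        (simp [pvChain, pvRep2_cons_cons, pvRep2_skip]; exact iht)
      · have hb' : (b == 'e') = false := by simpa using hb
        rw [hb']
        simp only [if_false, Bool.false_eq_true]
        (simp [pvChain, pvRep2_cons_cons, hb, pvRep2_skip]; exact ihbt)
    · by_cases ha2 : a = 'o'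
      · subst ha2
        rw [gO]
        by_cases hb : b = 'e'
        · subst hb
          (simp [pvChain, pvRep2_cons_cons, pvRep2_skip]; exact iht)
        · have hb' : (b == 'e') = false := by simpa using hb
          rw [hb']
          simp only [if_false, Bool.false_eq_true]
          have h0 : ((b :: t) : List Char).head? ≠ some 'e' := by simpa using hb
          have k1 : (pvRep2 'a' 'e' 'ä' (b :: t)).head? ≠ some 'e' :=
            pvRep2_head _ _ _ (by decide) _ h0
          (simp [pvChain, pvRep2_skip, pvRep2_skip_head _ _ _ _ k1]; exact ihbt)
      · by_cases ha3 : a = 'u'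
        · subst ha3
          rw [gU]
          by_cases hb : b = 'e'
          · subst hb
            (simp [pvChain, pvRep2_cons_cons, pvRep2_skip]; exact iht)
          · have hb' : (b == 'e') = false := by simpa using hb
            rw [hb']
            simp only [if_false, Bool.false_eq_true]
            have h0 : ((b :: t) : List Char).head? ≠ some 'e' := by simpa using hb
            have k1 : (pvRep2 'a' 'e' 'ä' (b :: t)).head? ≠ some 'e' :=
              pvRep2_head _ _ _ (by decide) _ h0
            have k2 : (pvRep2 'o' 'e' 'ö' (pvRep2 'a' 'e' 'ä' (b :: t))).head? ≠ some 'e' :=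
              pvRep2_head _ _ _ (by decide) _ k1
            (simp [pvChain, pvRep2_skip, pvRep2_skip_head _ _ _ _ k2]; exact ihbt)
        · by_cases ha4 : a = 'A'
          · subst ha4
            rw [gcA]
            by_cases hb : b = 'e'
            · subst hb
              (simp [pvChain, pvRep2_cons_cons, pvRep2_skip]; exact iht)
            · have hb' : (b == 'e') = false := by simpa using hb
              rw [hb']
              simp only [if_false, Bool.false_eq_true]
              have h0 : ((b :: t) : List Char).head? ≠ some 'e' := by simpa using hb
              have k1 : (pvRep2 'a' 'e' 'ä' (b :: t)).head? ≠ some 'e' :=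
                pvRep2_head _ _ _ (by decide) _ h0
              have k2 : (pvRep2 'o' 'e' 'ö' (pvRep2 'a' 'e' 'ä' (b :: t))).head? ≠ some 'e' :=
                pvRep2_head _ _ _ (by decide) _ k1
              have k3 : (pvRep2 'u' 'e' 'ü' (pvRep2 'o' 'e' 'ö' (pvRep2 'a' 'e' 'ä' (b :: t)))).head? ≠ some 'e' :=
                pvRep2_head _ _ _ (by decide) _ k2
              (simp [pvChain, pvRep2_skip, pvRep2_skip_head _ _ _ _ k3]; exact ihbt)
          · by_cases ha5 : a = 'O'
            · subst ha5
              rw [gcO]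
              by_cases hb : b = 'e'
              · subst hb
                (simp [pvChain, pvRep2_cons_cons, pvRep2_skip]; exact iht)
              · have hb' : (b == 'e') = false := by simpa using hb
                rw [hb']
                simp only [if_false, Bool.false_eq_true]
                have h0 : ((b :: t) : List Char).head? ≠ some 'e' := by simpa using hb
                have k1 : (pvRep2 'a' 'e' 'ä' (b :: t)).head? ≠ some 'e' :=
                  pvRep2_head _ _ _ (by decide) _ h0
                have k2 : (pvRep2 'o' 'e' 'ö' (pvRep2 'a' 'e' 'ä' (b :: t))).head? ≠ some 'e' :=
                  pvRep2_head _ _ _ (by decide) _ k1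
                have k3 : (pvRep2 'u' 'e' 'ü' (pvRep2 'o' 'e' 'ö' (pvRep2 'a' 'e' 'ä' (b :: t)))).head? ≠ some 'e' :=
                  pvRep2_head _ _ _ (by decide) _ k2
                have k4 : (pvRep2 'A' 'e' 'Ä' (pvRep2 'u' 'e' 'ü' (pvRep2 'o' 'e' 'ö' (pvRep2 'a' 'e' 'ä' (b :: t))))).head? ≠ some 'e' :=
                  pvRep2_head _ _ _ (by decide) _ k3
                (simp [pvChain, pvRep2_skip, pvRep2_skip_head _ _ _ _ k4]; exact ihbt)
            · by_cases ha6 : a = 'U'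
              · subst ha6
                rw [gcU]
                by_cases hb : b = 'e'
                · subst hb
                  (simp [pvChain, pvRep2_cons_cons, pvRep2_skip]; exact iht)
                · have hb' : (b == 'e') = false := by simpa using hb
                  rw [hb']
                  simp only [if_false, Bool.false_eq_true]
                  have h0 : ((b :: t) : List Char).head? ≠ some 'e' := by simpa using hb
                  have k1 : (pvRep2 'a' 'e' 'ä' (b :: t)).head? ≠ some 'e' :=
                    pvRep2_head _ _ _ (by decide) _ h0
                  have k2 : (pvRep2 'o' 'e' 'ö' (pvRep2 'a' 'e' 'ä' (b :: t))).head? ≠ some 'e' :=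
                    pvRep2_head _ _ _ (by decide) _ k1
                  have k3 : (pvRep2 'u' 'e' 'ü' (pvRep2 'o' 'e' 'ö' (pvRep2 'a' 'e' 'ä' (b :: t)))).head? ≠ some 'e' :=
                    pvRep2_head _ _ _ (by decide) _ k2
                  have k4 : (pvRep2 'A' 'e' 'Ä' (pvRep2 'u' 'e' 'ü' (pvRep2 'o' 'e' 'ö' (pvRep2 'a' 'e' 'ä' (b :: t))))).head? ≠ some 'e' :=
                    pvRep2_head _ _ _ (by decide) _ k3
                  have k5 : (pvRep2 'O' 'e' 'Ö' (pvRep2 'A' 'e' 'Ä' (pvRep2 'u' 'e' 'ü' (pvRep2 'o' 'e' 'ö' (pvRep2 'a' 'e' 'ä' (b :: t)))))).head? ≠ some 'e' :=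
                    pvRep2_head _ _ _ (by decide) _ k4
                  (simp [pvChain, pvRep2_skip, pvRep2_skip_head _ _ _ _ k5]; exact ihbt)
              · rw [pvGet_none a ha1 ha2 ha3 ha4 ha5 ha6]
                (simp [pvChain, pvRep2_skip, ha1, ha2, ha3, ha4, ha5, ha6]; exact ihbt)

theorem pvStep_eq (out : List String) (word : String) :
    (let w := PySem.Str.strip (if word == "" then "" else word)
     if w == "" then out
     else
       let out := out ++ [w]
       let variant :=
         PySem.Str.replace (PySem.Str.replace (PySem.Str.replace
           (PySem.Str.replace (PySem.Str.replace (PySem.Str.replace w "ae" "ä")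
             "oe" "ö") "ue" "ü") "Ae" "Ä") "Oe" "Ö") "Ue" "Ü"
       if variant != w then out ++ [variant] else out) =
    (let w := PySem.Str.strip (if word == "" then "" else word)
     if w == "" then out
     else
       let out := out ++ [w]
       let r := pvScan w.toList
       if r.2 then out ++ [String.ofList r.1] else out) := by
  by_cases hw : PySem.Str.strip (if word == "" then "" else word) == ""
  · simp only [hw, if_true]
  · simp only [hw, if_false]
    set w := PySem.Str.strip (if word == "" then "" else word)
    have hv : PySem.Str.replace (PySem.Str.replace (PySem.Str.replace
        (PySem.Str.replace (PySem.Str.replace (PySem.Str.replace w "ae" "ä")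
          "oe" "ö") "ue" "ü") "Ae" "Ä") "Oe" "Ö") "Ue" "Ü"
        = String.ofList (pvChain w.toList) := by
      simp only [PySem.Str.replace, String.toList_ofList]
      have t1 : ("ae" : String).toList = ['a', 'e'] := by decide
      have t2 : ("oe" : String).toList = ['o', 'e'] := by decide
      have t3 : ("ue" : String).toList = ['u', 'e'] := by decide
      have t4 : ("Ae" : String).toList = ['A', 'e'] := by decide
      have t5 : ("Oe" : String).toList = ['O', 'e'] := by decide
      have t6 : ("Ue" : String).toList = ['U', 'e'] := by decide
      have u1 : ("ä" : String).toList = ['ä'] := by decide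
      have u2 : ("ö" : String).toList = ['ö'] := by decide
      have u3 : ("ü" : String).toList = ['ü'] := by decide
      have u4 : ("Ä" : String).toList = ['Ä'] := by decide
      have u5 : ("Ö" : String).toList = ['Ö'] := by decide
      have u6 : ("Ü" : String).toList = ['Ü'] := by decide
      rw [t1, t2, t3, t4, t5, t6, u1, u2, u3, u4, u5, u6]
      rw [pvReplace_eq_rep2, pvReplace_eq_rep2, pvReplace_eq_rep2,
        pvReplace_eq_rep2, pvReplace_eq_rep2, pvReplace_eq_rep2]
      rfl
    rw [hv]
    cases hc : (pvScan w.toList).2 with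
    | false =>
      have hid : (pvScan w.toList).1 = w.toList := pvScan_fst_id _ hc
      have : String.ofList (pvChain w.toList) = w := by
        rw [pvChain_eq_scan, hid, String.ofList_toList]
      simp [this]
    | true =>
      have hlen := pvScan_fst_len w.toList hc
      have hne : String.ofList (pvChain w.toList) ≠ w := by
        intro h
        have : pvChain w.toList = w.toList := by
          have := congrArg String.toList h
          simpa [String.toList_ofList] using this
        rw [pvChain_eq_scan] at this
        have := congrArg List.length this
        omega
      have : (String.ofList (pvChain w.toList) != w) = true := by simpa using hne
      simp [this, pvChain_eq_scan]
      rw [pvChain_eq_scan] at hne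
      exact hne

-- ===== VERDICT (by name: the statement is the Claim_ definition above) =====
theorem add_umlaut_variants_py_spec : Claim_equal_add_umlaut_variants_py := by
  intro words _
  unfold Spec_add_umlaut_variants_py add_umlaut_variants_py add_umlaut_variants_py_alt
  exact congrFun (congrFun (congrArg List.foldl
    (funext fun out => funext fun word => pvStep_eq out word)) []) words
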